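-- pv_equiv track=rewrite | github.com/dimitriospapathanasiou/Algorithm-Assignments | Algorithm_commentz_walter.py | find_depths
-- ===== SOURCE A (Python) =====
-- def find_depths(adjlist):
--     def dfs(vertex, depth):
--         depths[vertex] = depth
--         for neighbor, connection in enumerate(adjlist[vertex]):
--             if connection == 1 and depths[neighbor] == -1:
--                 dfs(neighbor, depth + 1)
--     num = len(adjlist)
--     depths = [-1] * num
--     for vertex in range(num):
--         if depths[vertex] == -1:
--             dfs(vertex, 0)
--     return depths
-- ===== SOURCE B (Python) =====
-- def find_depths(adjlist):
--     num = len(adjlist)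
--     depth_of = {}
--     for start in range(num):
--         if start in depth_of:
--             continue
--         stack = [(start, 0)]
--         while stack:
--             v, d = stack.pop()
--             if v in depth_of:
--                 continue
--             depth_of[v] = d
--             row = adjlist[v]
--             for i in reversed(range(len(row))):
--                 if row[i] == 1:
--                     stack.append((i, d + 1))
--     return [depth_of[v] for v in range(num)]
-- ===== Notes on version B (the rewrite author's own statement) =====
-- stated objective: alternative
-- what changed: The recursive DFS mutating a preallocated depths list is replaced by an iterative DFS with an explicit (vertex, depth) stack and a dict of assigned depths, materialised into the output list only at the end; neighbors are pushed in reverse index order so pops reproduce A's pre-order exactly.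
import Mathlib
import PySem

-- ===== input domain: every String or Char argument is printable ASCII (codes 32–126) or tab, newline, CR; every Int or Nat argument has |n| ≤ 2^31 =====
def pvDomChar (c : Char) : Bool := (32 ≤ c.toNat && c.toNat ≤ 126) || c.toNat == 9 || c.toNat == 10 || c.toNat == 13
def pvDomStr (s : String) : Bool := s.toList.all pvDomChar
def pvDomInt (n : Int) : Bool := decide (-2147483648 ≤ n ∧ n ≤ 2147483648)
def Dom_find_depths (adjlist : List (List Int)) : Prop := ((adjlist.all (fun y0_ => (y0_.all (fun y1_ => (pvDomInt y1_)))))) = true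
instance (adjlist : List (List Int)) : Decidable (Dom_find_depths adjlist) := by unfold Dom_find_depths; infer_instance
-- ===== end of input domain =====

-- B replaces A's recursive DFS over a mutable depths list by an iterative DFS with an explicit
-- stack and a DICT of assigned depths, materialised into the output list only at the end;
-- neighbors are pushed in reverse index order so pops reproduce A's pre-order exactly.

-- ===== PORT A =====
-- A's nested recursive dfs.  The Nat fuel is only a totality guard (A's recursion depth is
-- bounded by the number of -1 entries of depths); find_depths passes adjlist.length + 1,
-- which the proofs below show is never exhausted.
def dfsA (adjlist : List (List Int)) : Nat → Int → Int → List Int → List Int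
  | 0, _, _, depths => depths
  | fuel + 1, vertex, depth, depths =>
    -- depths[vertex] = depth; then for neighbor, connection in enumerate(adjlist[vertex]): …
    (PySem.List.enumerate (PySem.List.pyGetD adjlist vertex [])).foldl
      (fun dd p =>
        if p.2 = 1 ∧ PySem.List.pyGetD dd p.1 0 = -1 then
          dfsA adjlist fuel p.1 (depth + 1) dd
        else dd)
      (PySem.List.pySetD depths vertex depth)

def find_depths (adjlist : List (List Int)) : List Int :=
  (PySem.List.pyRange 0 (adjlist.length : Int) 1).foldl
    (fun depths vertex =>
      if PySem.List.pyGetD depths vertex 0 = -1 then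
        dfsA adjlist (adjlist.length + 1) vertex 0 depths
      else depths)
    (List.replicate adjlist.length (-1))

-- ===== PORT B =====
-- B's while loop: pop (v, d); skip if v already in the dict, else record depth_of[v] = d and
-- push (i, d+1) for i in reversed(range(len(row))) with row[i] == 1.  The Python stack
-- (top = end of list) is represented head-as-top.  The Nat fuel is a totality guard for the
-- while loop; the proofs show the fuel passed is never exhausted.
def runB (adjlist : List (List Int)) : Nat → List (Int × Int) → PySem.Dict Int Int → PySem.Dict Int Int
  | 0, _, m => m
  | _ + 1, [], m => m
  | fuel + 1, (v, d) :: stack, m =>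
    if m.contains v then runB adjlist fuel stack m
    else
      let row := PySem.List.pyGetD adjlist v []
      runB adjlist fuel
        (((PySem.List.pyRange 0 (row.length : Int) 1).reverse).foldl
          (fun st i => if PySem.List.pyGetD row i 0 == 1 then (i, d + 1) :: st else st)
          stack)
        (m.insert v d)

def find_depths_alt (adjlist : List (List Int)) : List Int :=
  let m := (PySem.List.pyRange 0 (adjlist.length : Int) 1).foldl
    (fun m start =>
      if m.contains start then m
      else runB adjlist (adjlist.length * (adjlist.length + 1) + 1) [(start, 0)] m)
    PySem.Dict.empty
  (PySem.List.pyRange 0 (adjlist.length : Int) 1).map (fun v => m.getD v 0)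

-- ===== PRECONDITION & SPEC =====
-- Pre_ excludes exactly the inputs on which Python A raises IndexError: some row carries a 1
-- at a column index ≥ len(adjlist), so depths[neighbor] is read out of range (the outer loop
-- eventually visits every row).  B raises there too.  No input on which A returns is excluded.
def Pre_find_depths (adjlist : List (List Int)) : Prop :=
  ∀ row ∈ adjlist, ∀ x ∈ row.drop adjlist.length, x ≠ (1 : Int)
instance (adjlist : List (List Int)) : Decidable (Pre_find_depths adjlist) := by
  unfold Pre_find_depths; infer_instance

def pvWitness_find_depths : List (List Int) := [[0, 1], [1, 0]]

def Spec_find_depths (adjlist : List (List Int)) (out : List Int) : Prop := out = find_depths_alt adjlist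
instance (adjlist : List (List Int)) (out : List Int) : Decidable (Spec_find_depths adjlist out) := by unfold Spec_find_depths; infer_instance

-- ===== CLAIM (what is proved, stated in full; the proofs are below) =====
def Claim_equal_find_depths : Prop := ∀ (adjlist : List (List Int)), Dom_find_depths adjlist → Pre_find_depths adjlist → Spec_find_depths adjlist (find_depths adjlist)

-- ===== LEMMAS AND PROOFS =====

-- number of unvisited (-1) entries of A's list
def cnt (d : List Int) : Nat := d.countP (fun x => x == -1)

-- every stack entry has a vertex in [0, N) and a nonnegative depth
def stInv (N : Nat) (st : List (Int × Int)) : Prop :=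
  ∀ p ∈ st, (0 ≤ p.1 ∧ p.1.toNat < N) ∧ 0 ≤ p.2

-- the simulation relation between A's depths list d and B's dict m
def RelDM (N : Nat) (d : List Int) (m : PySem.Dict Int Int) : Prop :=
  d.length = N ∧
  (∀ k : Int, 0 ≤ k → k.toNat < N →
    m.get? k = (if d.getD k.toNat 0 = -1 then none else some (d.getD k.toNat 0))) ∧
  (∀ k : Int, ¬ (0 ≤ k ∧ k.toNat < N) → m.get? k = none)

-- step bound for B's while loop, measured on the related A-state d
def mB (adjlist : List (List Int)) (st : List (Int × Int)) (d : List Int) : Nat :=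
  st.length + cnt d * (adjlist.length + 1)

-- canonical (fuel-insensitive) forms
def rB (adjlist : List (List Int)) (st : List (Int × Int)) (d : List Int)
    (m : PySem.Dict Int Int) : PySem.Dict Int Int :=
  runB adjlist (mB adjlist st d) st m
def dA (adjlist : List (List Int)) (d : List Int) (v dep : Int) : List Int :=
  dfsA adjlist (cnt d + 1) v dep d

-- the stack segment B pushes when it expands v
def pushB (adjlist : List (List Int)) (v dep : Int) : List (Int × Int) :=
  ((PySem.List.enumerate (PySem.List.pyGetD adjlist v [])).filter (fun p => p.2 == 1)).map
    (fun p => (p.1, dep + 1))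

lemma gD {α : Type} (xs : List α) {i : Int} (d : α) (hi : 0 ≤ i) :
    PySem.List.pyGetD xs i d = xs.getD i.toNat d := by
  rw [← Int.toNat_of_nonneg hi, PySem.List.pyGetD_natCast]; simp; rw [max_eq_left hi]

lemma lt_len {d : List Int} {v : Int} (hv : 0 ≤ v) (h : PySem.List.pyGetD d v 0 = -1) :
    v.toNat < d.length := by
  rw [gD d 0 hv] at h
  by_contra hn
  rw [List.getD_eq_default] at h; · omega
  omega

lemma cnt_pos {d : List Int} {v : Int} (hv : 0 ≤ v) (h : PySem.List.pyGetD d v 0 = -1) :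
    0 < cnt d := by
  have hn := lt_len hv h
  rw [gD d 0 hv, List.getD_eq_getElem d 0 hn] at h
  rw [cnt, List.countP_pos_iff]
  exact ⟨-1, h ▸ List.getElem_mem hn, by simp⟩

lemma cnt_set {d : List Int} {v x : Int} (hv : 0 ≤ v) (h : PySem.List.pyGetD d v 0 = -1)
    (hx : x ≠ -1) : cnt (d.set v.toNat x) + 1 = cnt d := by
  have hn := lt_len hv h
  have hp := cnt_pos hv h
  rw [gD d 0 hv, List.getD_eq_getElem d 0 hn] at h
  rw [cnt, cnt, List.countP_set hn] at *
  simp [h, hx]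
  omega

-- RelDM ↔ contains/pyGetD transfer
lemma rel_contains_false {N : Nat} {d : List Int} {m : PySem.Dict Int Int} (hR : RelDM N d m)
    {k : Int} (hk : 0 ≤ k) (hkN : k.toNat < N) (h : PySem.List.pyGetD d k 0 = -1) :
    m.contains k = false := by
  rw [PySem.Dict.contains_eq_isSome_get?, hR.2.1 k hk hkN]
  rw [gD d 0 hk] at h
  rw [if_pos h]
  rfl

lemma rel_contains_true {N : Nat} {d : List Int} {m : PySem.Dict Int Int} (hR : RelDM N d m)
    {k : Int} (hk : 0 ≤ k) (hkN : k.toNat < N) (h : PySem.List.pyGetD d k 0 ≠ -1) :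
    m.contains k = true := by
  rw [PySem.Dict.contains_eq_isSome_get?, hR.2.1 k hk hkN]
  rw [gD d 0 hk] at h
  rw [if_neg h]
  rfl

lemma rel_ne_of_contains {N : Nat} {d : List Int} {m : PySem.Dict Int Int} (hR : RelDM N d m)
    {k : Int} (hk : 0 ≤ k) (hkN : k.toNat < N) (h : m.contains k = true) :
    PySem.List.pyGetD d k 0 ≠ -1 := by
  intro he
  rw [rel_contains_false hR hk hkN he] at h
  exact Bool.false_ne_true h

-- RelDM is preserved by the simultaneous update d[v] := dep, m[v] := dep
lemma rel_insert {N : Nat} {d : List Int} {m : PySem.Dict Int Int} (hR : RelDM N d m)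
    {v dep : Int} (hv : 0 ≤ v) (hvN : v.toNat < N) (hdep : 0 ≤ dep) :
    RelDM N (d.set v.toNat dep) (m.insert v dep) := by
  obtain ⟨hlen, hin, hout⟩ := hR
  refine ⟨by rw [List.length_set]; exact hlen, ?_, ?_⟩
  · intro k hk hkN
    rw [PySem.Dict.get?_insert]
    by_cases hkv : k = v
    · subst hkv
      have h1 : (d.set k.toNat dep).getD k.toNat 0 = dep := by
        rw [List.getD_eq_getElem _ _ (by rw [List.length_set]; omega), List.getElem_set,
          if_pos rfl]
      rw [if_pos rfl, h1, if_neg (by omega)]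
    · have hne : k.toNat ≠ v.toNat := by omega
      have h2 : (d.set v.toNat dep).getD k.toNat 0 = d.getD k.toNat 0 := by
        rw [List.getD_eq_getElem _ _ (by rw [List.length_set]; omega), List.getElem_set,
          if_neg (by omega), ← List.getD_eq_getElem _ _ (by omega)]
      rw [if_neg hkv, h2]
      exact hin k hk hkN
  · intro k hk
    have hkv : k ≠ v := by
      intro he; subst he; exact hk ⟨hv, hvN⟩
    rw [PySem.Dict.get?_insert, if_neg hkv]
    exact hout k hk

-- folding the push loop over the reversed list prepends the filtered segment
lemma push_eq (l : List (Int × Int)) (dep : Int) (stack : List (Int × Int)) :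
    (l.reverse).foldl (fun st p => if p.2 == 1 then (p.1, dep + 1) :: st else st) stack
    = (l.filter (fun p => p.2 == 1)).map (fun p => (p.1, dep + 1)) ++ stack := by
  induction l generalizing stack with
  | nil => simp
  | cons x t ih =>
    rw [List.reverse_cons, List.foldl_append, ih]
    by_cases hx : x.2 = 1 <;> simp [hx]

-- B's port push loop (reversed index range over the row) builds exactly pushB ++ stack
lemma port_push_eq (adjlist : List (List Int)) (v dep : Int) (stack : List (Int × Int)) :
    (((PySem.List.pyRange 0 ((PySem.List.pyGetD adjlist v []).length : Int) 1).reverse).foldl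
      (fun st i =>
        if PySem.List.pyGetD (PySem.List.pyGetD adjlist v []) i 0 == 1 then (i, dep + 1) :: st
        else st)
      stack)
    = pushB adjlist v dep ++ stack := by
  rw [pushB, ← push_eq,
    PySem.List.enumerate_eq_map_pyRange (PySem.List.pyGetD adjlist v []) 0,
    ← List.map_reverse, List.foldl_map]
  simp only [PySem.List.len_eq]

-- neighbors with connection 1 have index < adjlist.length (Pre_) and are nonnegative
lemma enum_bound (adjlist : List (List Int)) (hPre : Pre_find_depths adjlist) {v : Int}
    (hv : 0 ≤ v) :
    ∀ p ∈ PySem.List.enumerate (PySem.List.pyGetD adjlist v []),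
      0 ≤ p.1 ∧ (p.2 = 1 → p.1.toNat < adjlist.length) := by
  intro p hp
  obtain ⟨k, hk, rfl⟩ := (PySem.List.mem_enumerate_iff _ _ _).mp hp
  refine ⟨by simp, ?_⟩
  intro h1
  simp only [Int.zero_add, Int.toNat_natCast]
  by_contra hge
  have hrow : PySem.List.pyGetD adjlist v [] = adjlist.getD v.toNat [] := gD adjlist [] hv
  have hvlt : v.toNat < adjlist.length := by
    by_contra hge2
    rw [hrow, List.getD_eq_default _ _ (by omega)] at hk
    simp at hk
  have hmem : PySem.List.pyGetD adjlist v [] ∈ adjlist := by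
    rw [hrow, List.getD_eq_getElem _ _ hvlt]
    exact List.getElem_mem hvlt
  have hdropped : (PySem.List.pyGetD adjlist v [])[k] ∈
      (PySem.List.pyGetD adjlist v []).drop adjlist.length := by
    rw [List.mem_iff_getElem]
    refine ⟨k - adjlist.length, by rw [List.length_drop]; omega, ?_⟩
    rw [List.getElem_drop]
    congr 1; omega
  exact hPre _ hmem _ hdropped (by simpa using h1)

lemma pushB_inv (adjlist : List (List Int)) (hPre : Pre_find_depths adjlist) {v dep : Int}
    (hv : 0 ≤ v) (hdep : 0 ≤ dep) :
    ∀ p ∈ pushB adjlist v dep, (0 ≤ p.1 ∧ p.1.toNat < adjlist.length) ∧ 0 ≤ p.2 := by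
  intro p hp
  obtain ⟨q, hq, rfl⟩ := List.mem_map.mp hp
  have hb := enum_bound adjlist hPre hv q (List.mem_of_mem_filter hq)
  have h1 : q.2 = (1 : Int) := by simpa using List.of_mem_filter hq
  exact ⟨⟨hb.1, hb.2 h1⟩, by omega⟩

lemma pushB_len_le (adjlist : List (List Int)) (hPre : Pre_find_depths adjlist) {v : Int}
    (hv : 0 ≤ v) (dep : Int) : (pushB adjlist v dep).length ≤ adjlist.length := by
  set N := adjlist.length with hN
  set row := PySem.List.pyGetD adjlist v [] with hrow
  have hrowPre : ∀ x ∈ row.drop N, x ≠ (1 : Int) := by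
    rw [hrow, ← Int.toNat_of_nonneg hv, PySem.List.pyGetD_natCast]
    by_cases hlt : v.toNat < adjlist.length
    · rw [List.getD_eq_getElem _ _ hlt]; exact hPre _ (List.getElem_mem hlt)
    · rw [List.getD_eq_default _ _ (by omega)]; simp
  rw [pushB, List.length_map]
  calc ((PySem.List.enumerate row).filter (fun p => p.2 == 1)).length
      ≤ N := by
        conv_lhs => rw [← List.take_append_drop N row, PySem.List.enumerate_append,
          List.filter_append]
        have h2 : ((PySem.List.enumerate (row.drop N) (0 + (row.take N).length)).filter
            (fun p => p.2 == 1)) = [] := by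
          rw [List.filter_eq_nil_iff]
          intro p hp
          obtain ⟨k, hk, rfl⟩ := (PySem.List.mem_enumerate_iff _ _ _).mp hp
          simp only [beq_iff_eq]
          exact hrowPre _ (List.getElem_mem hk)
        rw [h2, List.append_nil]
        calc ((PySem.List.enumerate (row.take N)).filter (fun p => p.2 == 1)).length
            ≤ (PySem.List.enumerate (row.take N)).length := List.length_filter_le _ _
          _ = (row.take N).length := by rw [PySem.List.length_enumerate]
          _ ≤ N := by simp

lemma runB_nil (adjlist : List (List Int)) (f : Nat) (m : PySem.Dict Int Int) :
    runB adjlist f [] m = m := by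
  cases f <;> simp [runB]

-- keys only accumulate along B's while loop
lemma runB_contains_mono (adjlist : List (List Int)) :
    ∀ (f : Nat) (st : List (Int × Int)) (m : PySem.Dict Int Int) (k : Int),
      m.contains k = true → (runB adjlist f st m).contains k = true := by
  intro f
  induction f with
  | zero => intro st m k h; simpa [runB] using h
  | succ f ih =>
    intro st m k h
    cases st with
    | nil => simpa [runB] using h
    | cons p rest =>
      obtain ⟨v, dep⟩ := p
      simp only [runB]
      split_ifs with hc
      · exact ih rest m k h
      · refine ih _ _ k ?_
        rw [PySem.Dict.contains_insert]
        simp [h]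

lemma runB_congr (adjlist : List (List Int)) (hPre : Pre_find_depths adjlist) :
    ∀ (f g : Nat) (st : List (Int × Int)) (d : List Int) (m : PySem.Dict Int Int),
      stInv adjlist.length st → RelDM adjlist.length d m →
      mB adjlist st d ≤ f → mB adjlist st d ≤ g →
      runB adjlist f st m = runB adjlist g st m := by
  intro f
  induction f with
  | zero =>
    intro g st d m _ _ hf _
    have : st = [] := by
      rw [mB] at hf
      cases st with
      | nil => rfl
      | cons p t => simp at hf
    subst this
    rw [runB_nil, runB_nil]
  | succ f ih =>
    intro g st d m hst hR hf hg
    cases st with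
    | nil => rw [runB_nil, runB_nil]
    | cons p rest =>
      obtain ⟨v, dep⟩ := p
      have hmB : mB adjlist ((v, dep) :: rest) d
          = rest.length + 1 + cnt d * (adjlist.length + 1) := by rw [mB, List.length_cons]
      cases g with
      | zero => rw [mB] at hg; simp at hg
      | succ g' =>
        obtain ⟨⟨hv, hvN⟩, hdep⟩ := hst (v, dep) List.mem_cons_self
        simp only at hv hvN hdep
        rw [hmB] at hf hg
        simp only [runB]
        split_ifs with hcond
        · exact ih g' rest d m (fun q hq => hst q (List.mem_cons_of_mem _ hq)) hR
            (by rw [mB]; omega) (by rw [mB]; omega)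
        · have h : PySem.List.pyGetD d v 0 = -1 := by
            by_contra hne
            rw [rel_contains_true hR hv hvN hne] at hcond
            exact hcond rfl
          rw [port_push_eq]
          have hR' := rel_insert hR hv hvN hdep
          have hcs := cnt_set hv h (x := dep) (by omega)
          have hpl := pushB_len_le adjlist hPre hv dep
          have hmul : cnt d * (adjlist.length + 1)
              = cnt (d.set v.toNat dep) * (adjlist.length + 1) + (adjlist.length + 1) := by
            rw [← hcs]; ring
          have hst' : stInv adjlist.length (pushB adjlist v dep ++ rest) := by
            intro q hq
            rcases List.mem_append.mp hq with hq | hq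
            · exact pushB_inv adjlist hPre hv hdep q hq
            · exact hst q (List.mem_cons_of_mem _ hq)
          have hnew : mB adjlist (pushB adjlist v dep ++ rest) (d.set v.toNat dep)
              ≤ rest.length + cnt d * (adjlist.length + 1) := by
            rw [mB, List.length_append]
            omega
          exact ih g' _ (d.set v.toNat dep) _ hst' hR' (by omega) (by omega)

lemma rB_skip (adjlist : List (List Int))
    {v dep : Int} {st : List (Int × Int)} {d : List Int} {m : PySem.Dict Int Int}
    (hR : RelDM adjlist.length d m) (hv : 0 ≤ v) (hvN : v.toNat < adjlist.length)
    (h : PySem.List.pyGetD d v 0 ≠ -1) :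
    rB adjlist ((v, dep) :: st) d m = rB adjlist st d m := by
  rw [rB, rB]
  have hmB : mB adjlist ((v, dep) :: st) d = mB adjlist st d + 1 := by
    rw [mB, mB]; simp; omega
  rw [hmB]
  simp only [runB]
  rw [if_pos (rel_contains_true hR hv hvN h)]

lemma rB_set (adjlist : List (List Int)) (hPre : Pre_find_depths adjlist)
    {v dep : Int} {st : List (Int × Int)} {d : List Int} {m : PySem.Dict Int Int}
    (hst : stInv adjlist.length ((v, dep) :: st)) (hR : RelDM adjlist.length d m)
    (h : PySem.List.pyGetD d v 0 = -1) :
    rB adjlist ((v, dep) :: st) d m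
      = rB adjlist (pushB adjlist v dep ++ st) (PySem.List.pySetD d v dep) (m.insert v dep) := by
  obtain ⟨⟨hv, hvN⟩, hdep⟩ := hst (v, dep) List.mem_cons_self
  simp only at hv hvN hdep
  have hstt : stInv adjlist.length st := fun q hq => hst q (List.mem_cons_of_mem _ hq)
  have hstp : stInv adjlist.length (pushB adjlist v dep ++ st) := by
    intro q hq
    rcases List.mem_append.mp hq with hq | hq
    · exact pushB_inv adjlist hPre hv hdep q hq
    · exact hstt q hq
  rw [rB, rB]
  have hmB : mB adjlist ((v, dep) :: st) d
      = (st.length + cnt d * (adjlist.length + 1)) + 1 := by rw [mB]; simp; omega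
  rw [hmB]
  simp only [runB]
  rw [if_neg (by rw [rel_contains_false hR hv hvN h]; exact Bool.false_ne_true), port_push_eq]
  have hset : PySem.List.pySetD d v dep = d.set v.toNat dep :=
    PySem.List.pySetD_of_nonneg _ _ hv
  have hR' : RelDM adjlist.length (PySem.List.pySetD d v dep) (m.insert v dep) := by
    rw [hset]; exact rel_insert hR hv hvN (by omega)
  apply runB_congr adjlist hPre _ _ _ _ _ hstp hR' _ le_rfl
  rw [hset]
  have hcs := cnt_set hv h (x := dep) (by omega)
  have hpl := pushB_len_le adjlist hPre hv dep
  have hmul : cnt d * (adjlist.length + 1)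
      = cnt (d.set v.toNat dep) * (adjlist.length + 1) + (adjlist.length + 1) := by
    rw [← hcs]; ring
  rw [mB, List.length_append]
  omega

-- the conclusions of the main induction, for one call dfs(v, dep) on state d
def MC (adjlist : List (List Int)) (d : List Int) (v dep : Int) : Prop :=
  (∀ f, cnt d ≤ f → dfsA adjlist (f + 1) v dep d = dA adjlist d v dep)
  ∧ (dA adjlist d v dep).length = adjlist.length
  ∧ cnt (dA adjlist d v dep) < cnt d
  ∧ ∀ st m, stInv adjlist.length st → RelDM adjlist.length d m →
      ∃ m', RelDM adjlist.length (dA adjlist d v dep) m' ∧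
        rB adjlist ((v, dep) :: st) d m = rB adjlist st (dA adjlist d v dep) m'

-- the body of dfsA's loop at fuel f, and its canonical (fuel-free) form
def stepF (adjlist : List (List Int)) (f : Nat) (dep : Int) (dd : List Int) (p : Int × Int) :
    List Int :=
  if p.2 = 1 ∧ PySem.List.pyGetD dd p.1 0 = -1 then dfsA adjlist f p.1 (dep + 1) dd else dd

def stepC (adjlist : List (List Int)) (dep : Int) (dd : List Int) (p : Int × Int) : List Int :=
  if p.2 = 1 ∧ PySem.List.pyGetD dd p.1 0 = -1 then dA adjlist dd p.1 (dep + 1) else dd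

lemma stepF_hit {adjlist : List (List Int)} {f : Nat} {dep : Int} {dd : List Int} {i0 : Int}
    (h : PySem.List.pyGetD dd i0 0 = -1) :
    stepF adjlist f dep dd (i0, 1) = dfsA adjlist f i0 (dep + 1) dd := by
  simp [stepF, h]

lemma stepF_vis {adjlist : List (List Int)} {f : Nat} {dep : Int} {dd : List Int} {i0 : Int}
    (h : ¬ PySem.List.pyGetD dd i0 0 = -1) : stepF adjlist f dep dd (i0, 1) = dd := by
  simp [stepF, h]

lemma stepF_skip {adjlist : List (List Int)} {f : Nat} {dep : Int} {dd : List Int}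
    {i0 cv : Int} (h : cv ≠ 1) : stepF adjlist f dep dd (i0, cv) = dd := by
  simp [stepF, h]

lemma stepC_hit {adjlist : List (List Int)} {dep : Int} {dd : List Int} {i0 : Int}
    (h : PySem.List.pyGetD dd i0 0 = -1) :
    stepC adjlist dep dd (i0, 1) = dA adjlist dd i0 (dep + 1) := by
  simp [stepC, h]

lemma stepC_vis {adjlist : List (List Int)} {dep : Int} {dd : List Int} {i0 : Int}
    (h : ¬ PySem.List.pyGetD dd i0 0 = -1) : stepC adjlist dep dd (i0, 1) = dd := by
  simp [stepC, h]

lemma stepC_skip {adjlist : List (List Int)} {dep : Int} {dd : List Int} {i0 cv : Int}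
    (h : cv ≠ 1) : stepC adjlist dep dd (i0, cv) = dd := by
  simp [stepC, h]

-- the inner induction over dfsA's neighbor loop, assuming the outer IH (Hih)
lemma inner (adjlist : List (List Int)) (c0 : Nat)
    (dep : Int) (hdep : 0 ≤ dep)
    (Hih : ∀ (d' : List Int) (v' : Int), cnt d' < c0 → d'.length = adjlist.length →
      0 ≤ v' → PySem.List.pyGetD d' v' 0 = -1 → MC adjlist d' v' (dep + 1)) :
    ∀ (l : List (Int × Int)),
      (∀ p ∈ l, 0 ≤ p.1 ∧ (p.2 = 1 → p.1.toNat < adjlist.length)) →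
      ∀ (d' : List Int), d'.length = adjlist.length → cnt d' < c0 →
      ((∀ f, c0 ≤ f → l.foldl (stepF adjlist f dep) d' = l.foldl (stepC adjlist dep) d')
       ∧ (l.foldl (stepC adjlist dep) d').length = adjlist.length
       ∧ cnt (l.foldl (stepC adjlist dep) d') ≤ cnt d'
       ∧ ∀ st m, stInv adjlist.length st → RelDM adjlist.length d' m →
           ∃ m', RelDM adjlist.length (l.foldl (stepC adjlist dep) d') m' ∧
             rB adjlist
               ((l.filter (fun p => p.2 == 1)).map (fun p => (p.1, dep + 1)) ++ st) d' m
               = rB adjlist st (l.foldl (stepC adjlist dep) d') m') := by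
  intro l
  induction l with
  | nil =>
    intro _ d' hl hcd
    exact ⟨fun f _ => rfl, hl, le_rfl, fun st m hst hR => ⟨m, hR, by simp⟩⟩
  | cons p t iht =>
    intro hnn d' hlen' hcd
    obtain ⟨i0, cv⟩ := p
    obtain ⟨hi0, hi0N⟩ := hnn (i0, cv) List.mem_cons_self
    have hnt : ∀ q ∈ t, 0 ≤ q.1 ∧ (q.2 = 1 → q.1.toNat < adjlist.length) :=
      fun q hq => hnn q (List.mem_cons_of_mem _ hq)
    by_cases hcv : cv = (1 : Int)
    · subst hcv
      have hi0N' : i0.toNat < adjlist.length := hi0N rfl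
      by_cases h1' : PySem.List.pyGetD d' i0 0 = -1
      · obtain ⟨MA1, MA2, MA3, MSIM⟩ := Hih d' i0 hcd hlen' hi0 h1'
        obtain ⟨I1, I2, I3, I4⟩ :=
          iht hnt (dA adjlist d' i0 (dep + 1)) MA2 (lt_trans MA3 hcd)
        refine ⟨?_, ?_, ?_, ?_⟩
        · intro f hf
          obtain ⟨f', rfl⟩ : ∃ f', f = f' + 1 := ⟨f - 1, by omega⟩
          rw [List.foldl_cons, List.foldl_cons, stepF_hit h1', stepC_hit h1',
            MA1 f' (by omega)]
          exact I1 (f' + 1) hf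
        · rw [List.foldl_cons, stepC_hit h1']
          exact I2
        · rw [List.foldl_cons, stepC_hit h1']
          exact le_trans I3 (le_of_lt MA3)
        · intro st m hst hR
          have hstt : stInv adjlist.length ((t.filter (fun p => p.2 == 1)).map
              (fun p => (p.1, dep + 1)) ++ st) := by
            intro q hq
            rcases List.mem_append.mp hq with hq | hq
            · obtain ⟨r, hr, rfl⟩ := List.mem_map.mp hq
              have hrb := hnt r (List.mem_of_mem_filter hr)
              have hr1 : r.2 = (1 : Int) := by simpa using List.of_mem_filter hr
              exact ⟨⟨hrb.1, hrb.2 hr1⟩, by simp; omega⟩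
            · exact hst q hq
          obtain ⟨m₁, hRm₁, heq₁⟩ := MSIM _ m hstt hR
          obtain ⟨m₂, hRm₂, heq₂⟩ := I4 st m₁ hst hRm₁
          refine ⟨m₂, by rw [List.foldl_cons, stepC_hit h1']; exact hRm₂, ?_⟩
          rw [List.foldl_cons, stepC_hit h1',
            List.filter_cons_of_pos (by simp), List.map_cons, List.cons_append]
          rw [heq₁]
          exact heq₂
      · obtain ⟨I1, I2, I3, I4⟩ := iht hnt d' hlen' hcd
        refine ⟨?_, ?_, ?_, ?_⟩
        · intro f hf
          rw [List.foldl_cons, List.foldl_cons, stepF_vis h1', stepC_vis h1']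
          exact I1 f hf
        · rw [List.foldl_cons, stepC_vis h1']
          exact I2
        · rw [List.foldl_cons, stepC_vis h1']
          exact I3
        · intro st m hst hR
          obtain ⟨m', hRm', heq⟩ := I4 st m hst hR
          refine ⟨m', by rw [List.foldl_cons, stepC_vis h1']; exact hRm', ?_⟩
          rw [List.foldl_cons, stepC_vis h1',
            List.filter_cons_of_pos (by simp), List.map_cons, List.cons_append,
            rB_skip adjlist hR hi0 hi0N' h1']
          exact heq
    · obtain ⟨I1, I2, I3, I4⟩ := iht hnt d' hlen' hcd
      refine ⟨?_, ?_, ?_, ?_⟩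
      · intro f hf
        rw [List.foldl_cons, List.foldl_cons, stepF_skip hcv, stepC_skip hcv]
        exact I1 f hf
      · rw [List.foldl_cons, stepC_skip hcv]
        exact I2
      · rw [List.foldl_cons, stepC_skip hcv]
        exact I3
      · intro st m hst hR
        obtain ⟨m', hRm', heq⟩ := I4 st m hst hR
        refine ⟨m', by rw [List.foldl_cons, stepC_skip hcv]; exact hRm', ?_⟩
        rw [List.foldl_cons, stepC_skip hcv,
          List.filter_cons_of_neg (by simp [hcv])]
        exact heq

-- the main simulation: fuel-insensitivity of A's dfs, its length/count facts, and
-- "one stack entry of B = one recursive call of A", carrying the list/dict relation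
lemma main (adjlist : List (List Int)) (hPre : Pre_find_depths adjlist) :
    ∀ (c : Nat) (d : List Int) (v dep : Int), cnt d < c → d.length = adjlist.length →
      0 ≤ v → PySem.List.pyGetD d v 0 = -1 → 0 ≤ dep →
      MC adjlist d v dep := by
  intro c
  induction c with
  | zero => intro d v dep hc; omega
  | succ c ih =>
    intro d v dep hc hlen hv h1 hdep
    have hvlt : v.toNat < d.length := lt_len hv h1
    have hcpos : 0 < cnt d := cnt_pos hv h1
    have hset : PySem.List.pySetD d v dep = d.set v.toNat dep :=
      PySem.List.pySetD_of_nonneg _ _ hv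
    have hcs : cnt (PySem.List.pySetD d v dep) + 1 = cnt d := by
      rw [hset]; exact cnt_set hv h1 (by omega)
    have hlen1 : (PySem.List.pySetD d v dep).length = adjlist.length := by
      rw [hset, List.length_set]; exact hlen
    have Hih : ∀ (d' : List Int) (v' : Int), cnt d' < cnt d →
        d'.length = adjlist.length → 0 ≤ v' → PySem.List.pyGetD d' v' 0 = -1 →
        MC adjlist d' v' (dep + 1) :=
      fun d' v' hcd hl hv' h1' =>
        ih d' v' (dep + 1) (by omega) hl hv' h1' (by omega)
    have hnn := enum_bound adjlist hPre hv
    obtain ⟨I1, I2, I3, I4⟩ := inner adjlist (cnt d) dep hdep Hih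
      (PySem.List.enumerate (PySem.List.pyGetD adjlist v [])) hnn
      (PySem.List.pySetD d v dep) hlen1 (by omega)
    have hunf : ∀ f, dfsA adjlist (f + 1) v dep d
        = (PySem.List.enumerate (PySem.List.pyGetD adjlist v [])).foldl
            (stepF adjlist f dep) (PySem.List.pySetD d v dep) := fun f => rfl
    have hA : ∀ f, cnt d ≤ f → dfsA adjlist (f + 1) v dep d
        = (PySem.List.enumerate (PySem.List.pyGetD adjlist v [])).foldl
            (stepC adjlist dep) (PySem.List.pySetD d v dep) := by
      intro f hf; rw [hunf f]; exact I1 f hf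
    have hdA : dA adjlist d v dep
        = (PySem.List.enumerate (PySem.List.pyGetD adjlist v [])).foldl
            (stepC adjlist dep) (PySem.List.pySetD d v dep) := hA (cnt d) le_rfl
    refine ⟨?_, ?_, ?_, ?_⟩
    · intro f hf; rw [hA f hf, hdA]
    · rw [hdA]; exact I2
    · rw [hdA]; omega
    · intro st m hst hR
      have hstc : stInv adjlist.length ((v, dep) :: st) := by
        intro q hq
        rcases List.mem_cons.mp hq with rfl | hq
        · exact ⟨⟨hv, by omega⟩, hdep⟩
        · exact hst q hq
      have hR' : RelDM adjlist.length (PySem.List.pySetD d v dep) (m.insert v dep) := by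
        rw [hset]; exact rel_insert hR hv (by omega) hdep
      obtain ⟨m', hRm', heq⟩ := I4 st (m.insert v dep) hst hR'
      refine ⟨m', by rw [hdA]; exact hRm', ?_⟩
      rw [rB_set adjlist hPre hstc hR h1, hdA]
      exact heq

-- the outer loop: A's fold over range(num) is simulated by B's fold, keeping RelDM,
-- and afterwards every processed vertex is assigned (≠ -1)
lemma top (adjlist : List (List Int)) (hPre : Pre_find_depths adjlist) :
    ∀ (l : List Int) (d : List Int) (m : PySem.Dict Int Int),
      (∀ x ∈ l, 0 ≤ x ∧ x < (adjlist.length : Int)) → RelDM adjlist.length d m →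
      (RelDM adjlist.length
        (l.foldl
          (fun depths vertex =>
            if PySem.List.pyGetD depths vertex 0 = -1 then
              dfsA adjlist (adjlist.length + 1) vertex 0 depths
            else depths) d)
        (l.foldl
          (fun m start =>
            if m.contains start then m
            else runB adjlist (adjlist.length * (adjlist.length + 1) + 1) [(start, 0)] m) m)
       ∧ (∀ j : Int, 0 ≤ j → PySem.List.pyGetD d j 0 ≠ -1 →
            PySem.List.pyGetD
              (l.foldl
                (fun depths vertex =>
                  if PySem.List.pyGetD depths vertex 0 = -1 then
                    dfsA adjlist (adjlist.length + 1) vertex 0 depths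
                  else depths) d) j 0 ≠ -1)
       ∧ (∀ x ∈ l,
            PySem.List.pyGetD
              (l.foldl
                (fun depths vertex =>
                  if PySem.List.pyGetD depths vertex 0 = -1 then
                    dfsA adjlist (adjlist.length + 1) vertex 0 depths
                  else depths) d) x 0 ≠ -1)) := by
  intro l
  induction l with
  | nil =>
    intro d m _ hR
    exact ⟨hR, fun j _ h => h, fun x hx => absurd hx (List.not_mem_nil)⟩
  | cons x t ihl =>
    intro d m hnn hR
    obtain ⟨hx0, hxN⟩ := hnn x List.mem_cons_self
    have hxN' : x.toNat < adjlist.length := by omega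
    have hnt : ∀ y ∈ t, 0 ≤ y ∧ y < (adjlist.length : Int) :=
      fun y hy => hnn y (List.mem_cons_of_mem _ hy)
    simp only [List.foldl_cons]
    by_cases h : PySem.List.pyGetD d x 0 = -1
    · have hcle : cnt d ≤ adjlist.length := by
        rw [← hR.1]; exact List.countP_le_length
      obtain ⟨A1, A2, A3, SIM⟩ :=
        main adjlist hPre (cnt d + 1) d x 0 (by omega) hR.1 hx0 h le_rfl
      have ha : dfsA adjlist (adjlist.length + 1) x 0 d = dA adjlist d x 0 := A1 _ hcle
      obtain ⟨m₁, hRm₁, heq₁⟩ := SIM [] m (fun q hq => absurd hq (List.not_mem_nil)) hR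
      have hst1 : stInv adjlist.length [(x, 0)] := by
        intro q hq
        rcases List.mem_cons.mp hq with rfl | hq
        · exact ⟨⟨hx0, hxN'⟩, le_rfl⟩
        · exact absurd hq (List.not_mem_nil)
      have hb : runB adjlist (adjlist.length * (adjlist.length + 1) + 1) [(x, 0)] m = m₁ := by
        have hm : mB adjlist [(x, 0)] d ≤ adjlist.length * (adjlist.length + 1) + 1 := by
          have := Nat.mul_le_mul_right (adjlist.length + 1) hcle
          rw [mB]; simp; omega
        rw [runB_congr adjlist hPre _ _ _ d _ hst1 hR hm le_rfl]
        rw [show runB adjlist (mB adjlist [(x, 0)] d) [(x, 0)] m = rB adjlist [(x, 0)] d m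
            from rfl]
        rw [heq₁, rB, runB_nil]
      -- the dict after expanding x contains x
      have hcontx : m₁.contains x = true := by
        rw [← hb]
        obtain ⟨k, hk⟩ : ∃ k, adjlist.length * (adjlist.length + 1) + 1 = k + 1 :=
          ⟨_, rfl⟩
        rw [hk]
        simp only [runB]
        rw [if_neg (by rw [rel_contains_false hR hx0 hxN' h]; exact Bool.false_ne_true)]
        refine runB_contains_mono adjlist _ _ _ _ ?_
        exact PySem.Dict.contains_insert_self _ _ _
      have hdx : PySem.List.pyGetD (dA adjlist d x 0) x 0 ≠ -1 :=
        rel_ne_of_contains hRm₁ hx0 (by rw [← A2] at hxN' ⊢; omega) hcontx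
      -- monotonicity of dA through the dict
      have hmono : ∀ j : Int, 0 ≤ j → PySem.List.pyGetD d j 0 ≠ -1 →
          PySem.List.pyGetD (dA adjlist d x 0) j 0 ≠ -1 := by
        intro j hj hne
        by_cases hjN : j.toNat < adjlist.length
        · have hcj : m.contains j = true := rel_contains_true hR hj hjN hne
          have hcj' : m₁.contains j = true := by
            rw [← hb]; exact runB_contains_mono adjlist _ _ _ _ hcj
          exact rel_ne_of_contains hRm₁ hj hjN hcj'
        · rw [gD _ 0 hj, List.getD_eq_default _ _ (by omega)]
          omega
      rw [if_pos h, if_neg (by rw [rel_contains_false hR hx0 hxN' h]; exact Bool.false_ne_true),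
        ha, hb]
      obtain ⟨T1, T2, T3⟩ := ihl (dA adjlist d x 0) m₁ hnt hRm₁
      refine ⟨T1, ?_, ?_⟩
      · intro j hj hne
        exact T2 j hj (hmono j hj hne)
      · intro y hy
        rcases List.mem_cons.mp hy with rfl | hy
        · exact T2 y hx0 hdx
        · exact T3 y hy
    · have hcx : m.contains x = true := rel_contains_true hR hx0 hxN' h
      rw [if_neg h, if_pos hcx]
      obtain ⟨T1, T2, T3⟩ := ihl d m hnt hR
      refine ⟨T1, T2, ?_⟩
      intro y hy
      rcases List.mem_cons.mp hy with rfl | hy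
      · exact T2 y hx0 h
      · exact T3 y hy

-- ===== VERDICT (by name: the statement is the Claim_ definition above) =====
theorem find_depths_spec : Claim_equal_find_depths := by
  intro adjlist _ hPre
  unfold Spec_find_depths find_depths find_depths_alt
  have hR0 : RelDM adjlist.length (List.replicate adjlist.length (-1)) PySem.Dict.empty := by
    refine ⟨List.length_replicate, ?_, ?_⟩
    · intro k hk hkN
      rw [PySem.Dict.get?_empty, List.getD_eq_getElem _ _ (by simpa using hkN),
        List.getElem_replicate]
      simp
    · intro k _
      exact PySem.Dict.get?_empty k
  have hrange : ∀ x ∈ PySem.List.pyRange 0 (adjlist.length : Int) 1,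
      0 ≤ x ∧ x < (adjlist.length : Int) := fun x hx => PySem.List.mem_pyRange_one.mp hx
  obtain ⟨hRf, _, hall⟩ := top adjlist hPre
    (PySem.List.pyRange 0 (adjlist.length : Int) 1)
    (List.replicate adjlist.length (-1)) PySem.Dict.empty hrange hR0
  set df := (PySem.List.pyRange 0 (adjlist.length : Int) 1).foldl
      (fun depths vertex =>
        if PySem.List.pyGetD depths vertex 0 = -1 then
          dfsA adjlist (adjlist.length + 1) vertex 0 depths
        else depths)
      (List.replicate adjlist.length (-1)) with hdf
  set mf := (PySem.List.pyRange 0 (adjlist.length : Int) 1).foldl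
      (fun m start =>
        if m.contains start then m
        else runB adjlist (adjlist.length * (adjlist.length + 1) + 1) [(start, 0)] m)
      PySem.Dict.empty with hmf
  have hlen : df.length = adjlist.length := hRf.1
  have hmap : ∀ v ∈ PySem.List.pyRange 0 (adjlist.length : Int) 1,
      mf.getD v 0 = PySem.List.pyGetD df v 0 := by
    intro v hv
    obtain ⟨hv0, hvN⟩ := PySem.List.mem_pyRange_one.mp hv
    have hvN' : v.toNat < adjlist.length := by omega
    have hne := hall v hv
    rw [gD df 0 hv0] at hne ⊢
    rw [PySem.Dict.getD_eq_get?_getD, hRf.2.1 v hv0 hvN', if_neg hne]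
    rfl
  rw [List.map_congr_left hmap]
  have : (PySem.List.pyRange 0 ((df.length : Int)) 1).map
      (fun j => PySem.List.pyGetD df j 0) = df := PySem.List.map_pyGetD_pyRange_zero' df 0
  rw [← hlen]
  exact this.symm
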